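-- pv_equiv track=rewrite | github.com/lubart0618/quotation | quote-system-upload/app.py | space_numeric_token
-- ===== SOURCE A (Python) =====
-- def space_numeric_token(text: str, html: bool = False) -> str:
--     spacer = "&thinsp;" if html else " "
--     chars: list[str] = []
--     for index, char in enumerate(text):
--         chars.append(char)
--         if index == len(text) - 1:
--             continue
--         next_char = text[index + 1]
--         if char.isdigit() and next_char.isdigit():
--             chars.append(spacer)
--     return "".join(chars)
-- ===== SOURCE B (Python) =====
-- from itertools import groupby
--
--
-- def space_numeric_token(text: str, html: bool = False) -> str:
--     spacer = "&thinsp;" if html else " "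
--     pieces = []
--     for is_digit, group in groupby(text, key=str.isdigit):
--         run = "".join(group)
--         pieces.append(spacer.join(run) if is_digit else run)
--     return "".join(pieces)
-- ===== Notes on version B (the rewrite author's own statement) =====
-- stated objective: idiomatic
-- what changed: Replaces the per-character loop with index lookahead (text[index+1]) by an itertools.groupby decomposition into maximal digit/non-digit runs, joining digit runs with the spacer.
import Mathlib
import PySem

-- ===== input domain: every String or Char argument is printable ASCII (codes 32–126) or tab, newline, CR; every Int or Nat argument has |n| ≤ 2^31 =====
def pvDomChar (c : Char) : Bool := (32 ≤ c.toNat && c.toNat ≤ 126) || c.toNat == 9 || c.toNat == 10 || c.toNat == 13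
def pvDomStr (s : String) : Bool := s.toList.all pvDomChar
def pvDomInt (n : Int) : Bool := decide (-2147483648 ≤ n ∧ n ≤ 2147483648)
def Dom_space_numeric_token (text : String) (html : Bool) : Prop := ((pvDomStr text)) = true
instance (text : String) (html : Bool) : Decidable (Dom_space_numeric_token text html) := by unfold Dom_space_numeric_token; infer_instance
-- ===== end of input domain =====

-- B replaces A's per-character loop with index lookahead by a groupby decomposition into
-- maximal digit/non-digit runs, joining digit runs with the spacer (objective: idiomatic).

-- ===== PORT A =====
-- the for loop of A, as a recursion over enumerate(text) with the accumulator `chars`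
def space_numeric_token_loop (cs spacer : List Char) : List (Int × Char) → List Char → List Char
  | [], chars => chars
  | (index, char) :: rest, chars =>
    let chars1 := chars ++ [char]
    if index = (cs.length : Int) - 1 then
      space_numeric_token_loop cs spacer rest chars1
    else
      match PySem.List.pyGet? cs (index + 1) with
      | none => chars1  -- unreachable: index comes from enumerate, so index + 1 < len here
      | some next_char =>
        space_numeric_token_loop cs spacer rest
          (if PySem.Chars.isdigit char && PySem.Chars.isdigit next_char then chars1 ++ spacer
           else chars1)

def space_numeric_token (text : String) (html : Bool) : String :=
  let spacer := if html then "&thinsp;" else " "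
  String.mk
    (space_numeric_token_loop text.toList spacer.toList
      (PySem.List.enumerate text.toList) [])

-- ===== PORT B =====
-- itertools.groupby(text, key=str.isdigit): maximal runs, each tagged with its key
def pvRuns (key : Char → Bool) : List Char → List (Bool × List Char)
  | [] => []
  | c :: rest =>
    match pvRuns key rest with
    | [] => [(key c, [c])]
    | (k, g) :: gs =>
      if key c = k then (k, c :: g) :: gs else (key c, [c]) :: (k, g) :: gs

-- spacer.join(run), on code points
def pvJoinSep (sep : List Char) : List Char → List Char
  | [] => []
  | [c] => [c]
  | c :: rest => c :: (sep ++ pvJoinSep sep rest)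

def space_numeric_token_alt (text : String) (html : Bool) : String :=
  let spacer := if html then "&thinsp;" else " "
  String.mk
    (((pvRuns (fun c => PySem.Chars.isdigit c) text.toList).map
        (fun kg => if kg.1 then pvJoinSep spacer.toList kg.2 else kg.2)).flatten)

-- ===== PRECONDITION & SPEC =====
def Spec_space_numeric_token (text : String) (html : Bool) (out : String) : Prop := out = space_numeric_token_alt text html
instance (text : String) (html : Bool) (out : String) : Decidable (Spec_space_numeric_token text html out) := by unfold Spec_space_numeric_token; infer_instance

-- ===== CLAIM (what is proved, stated in full; the proofs are below) =====
def Claim_equal_space_numeric_token : Prop := ∀ (text : String) (html : Bool), Dom_space_numeric_token text html → Spec_space_numeric_token text html (space_numeric_token text html)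

-- ===== LEMMAS AND PROOFS =====

-- common pairwise characterisation: a copy of the spacer between adjacent digit pairs
def pvPW (dig : Char → Bool) (sep : List Char) : List Char → List Char
  | [] => []
  | [c] => [c]
  | c :: d :: rest => c :: ((if dig c && dig d then sep else []) ++ pvPW dig sep (d :: rest))

theorem pvLoop_eq_pvPW (sep : List Char) :
    ∀ (l pre chars : List Char),
      space_numeric_token_loop (pre ++ l) sep
        (PySem.List.enumerate l (pre.length : Int)) chars
      = chars ++ pvPW PySem.Chars.isdigit sep l := by
  intro l
  induction l with
  | nil => intro pre chars; simp [space_numeric_token_loop, pvPW]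
  | cons c l' ih =>
    intro pre chars
    rw [PySem.List.enumerate_cons]
    cases l' with
    | nil =>
      rw [PySem.List.enumerate_nil]
      simp only [space_numeric_token_loop]
      rw [if_pos (by simp : (pre.length : Int) = ((pre ++ [c]).length : Int) - 1)]
      simp [space_numeric_token_loop, pvPW]
    | cons d rest =>
      have hidx : ¬ ((pre.length : Int) = ((pre ++ c :: d :: rest).length : Int) - 1) := by
        simp; omega
      have hget : PySem.List.pyGet? (pre ++ c :: d :: rest) ((pre.length : Int) + 1)
          = some d := by
        have : ((pre.length : Int) + 1) = ((pre.length + 1 : Nat) : Int) := by push_cast; ring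
        rw [this, PySem.List.pyGet?_natCast]
        rw [List.getElem?_append_right (by omega)]
        simp
      have hrec := ih (pre ++ [c])
      simp only [List.append_assoc, List.cons_append, List.nil_append,
        List.length_append, List.length_cons, List.length_nil] at hrec
      have hstart : ((pre.length : Int) + 1) = ((pre.length + (1 + 0) : Nat) : Int) := by
        push_cast; ring
      rw [space_numeric_token_loop, if_neg hidx, hget]
      simp only []
      by_cases hd : PySem.Chars.isdigit c && PySem.Chars.isdigit d
      · rw [if_pos hd, hstart, hrec]
        simp [pvPW, hd]
      · rw [if_neg hd, hstart, hrec]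
        simp [pvPW, hd]

theorem pvRuns_cons_shape (key : Char → Bool) (c : Char) (l : List Char) :
    ∃ g gs, pvRuns key (c :: l) = (key c, c :: g) :: gs := by
  rw [pvRuns]
  rcases h : pvRuns key l with _ | ⟨⟨k, g⟩, gs⟩
  · exact ⟨[], [], rfl⟩
  · by_cases hk : key c = k
    · subst hk; simp
    · simp [hk]

theorem pvRuns_flatten_eq_pvPW (dig : Char → Bool) (sep : List Char) :
    ∀ l : List Char,
      ((pvRuns dig l).map (fun kg => if kg.1 then pvJoinSep sep kg.2 else kg.2)).flatten
      = pvPW dig sep l := by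
  intro l
  induction l with
  | nil => simp [pvRuns, pvPW]
  | cons c l' ih =>
    cases l' with
    | nil =>
      by_cases h : dig c <;> simp [pvRuns, pvPW, pvJoinSep, h]
    | cons d rest =>
      obtain ⟨g, gs, hshape⟩ := pvRuns_cons_shape dig d rest
      rw [hshape] at ih
      rw [pvRuns, hshape]
      dsimp only
      by_cases hk : dig c = dig d
      · rw [if_pos hk]
        by_cases hc : dig c
        · have hd : dig d = true := hk ▸ hc
          simp only [List.map_cons, List.flatten_cons, hc, hd, if_pos] at ih ⊢
          rw [show pvJoinSep sep (c :: d :: g) = c :: (sep ++ pvJoinSep sep (d :: g)) from rfl]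
          simp [pvPW, hc, hd, ih]
        · have hd : dig d = false := by
            cases hdd : dig d
            · rfl
            · exact absurd (hk.trans hdd) (by simpa using hc)
          simp only [Bool.not_eq_true] at hc
          simp only [List.map_cons, List.flatten_cons, hc, hd, Bool.false_eq_true,
            if_false] at ih ⊢
          simp [pvPW, hc, hd, ih]
      · rw [if_neg hk]
        have hnd : (dig c && dig d) = false := by
          cases h1 : dig c <;> cases h2 : dig d <;> simp_all
        simp only [List.map_cons, List.flatten_cons] at ih ⊢
        by_cases hc : dig c
        · have hd : dig d = false := by cases h2 : dig d <;> simp_all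
          simp only [hd, Bool.false_eq_true, if_false] at ih
          simp [pvPW, pvJoinSep, hnd, hc, hd, ih]
        · simp [pvPW, pvJoinSep, hnd, hc, ih]

-- ===== VERDICT (by name: the statement is the Claim_ definition above) =====
theorem space_numeric_token_spec : Claim_equal_space_numeric_token := by
  intro text html _
  have hA := pvLoop_eq_pvPW (if html then "&thinsp;" else " ").toList text.toList [] []
  simp only [List.nil_append, List.length_nil, Nat.cast_zero] at hA
  show String.mk
      (space_numeric_token_loop text.toList (if html then "&thinsp;" else " ").toList
        (PySem.List.enumerate text.toList) []) =
    String.mk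
      (((pvRuns (fun c => PySem.Chars.isdigit c) text.toList).map
          (fun kg => if kg.1 then pvJoinSep (if html then "&thinsp;" else " ").toList kg.2
                     else kg.2)).flatten)
  rw [hA, pvRuns_flatten_eq_pvPW]
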